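-- pv_equiv track=rewrite | github.com/CyberShellCode/CyberShellV2 | cybershell/http_engine.py | apply_unicode_normalization
-- ===== SOURCE A (Python) =====
-- def apply_unicode_normalization(payload: str) -> str:
--     """Apply Unicode normalization bypass"""
--     # Replace characters with Unicode equivalents
--     replacements = {
--         '<': '\uff1c',
--         '>': '\uff1e',
--         '"': '\uff02',
--         "'": '\uff07',
--         '/': '\uff0f',
--         '\\': '\uff3c'
--     }
--
--     result = payload
--     for char, unicode_char in replacements.items():
--         result = result.replace(char, unicode_char)
--
--     return result
-- ===== SOURCE B (Python) =====
-- def apply_unicode_normalization(payload: str) -> str: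
--     """Apply Unicode normalization bypass"""
--     mapping = {
--         '<': '\uff1c',
--         '>': '\uff1e',
--         '"': '\uff02',
--         "'": '\uff07',
--         '/': '\uff0f',
--         '\\': '\uff3c'
--     }
--     return ''.join(mapping.get(c, c) for c in payload)
-- ===== Notes on version B (the rewrite author's own statement) =====
-- stated objective: idiomatic
-- what changed: B makes a single pass over the characters of payload, emitting mapping.get(c, c) for each and joining, instead of A's six sequential whole-string str.replace passes.
import Mathlib
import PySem

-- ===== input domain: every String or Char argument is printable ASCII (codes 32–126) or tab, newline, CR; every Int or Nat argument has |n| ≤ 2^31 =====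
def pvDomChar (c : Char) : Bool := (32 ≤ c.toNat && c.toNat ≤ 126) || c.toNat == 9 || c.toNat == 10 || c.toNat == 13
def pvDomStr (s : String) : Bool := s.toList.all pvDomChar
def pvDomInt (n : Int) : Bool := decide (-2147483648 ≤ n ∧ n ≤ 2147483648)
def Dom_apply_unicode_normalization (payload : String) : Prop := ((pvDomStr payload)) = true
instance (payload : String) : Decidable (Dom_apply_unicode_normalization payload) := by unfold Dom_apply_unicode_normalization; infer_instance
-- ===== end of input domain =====

-- B replaces A's six sequential whole-string str.replace passes by a single pass over the
-- characters, emitting mapping.get(c, c) for each (objective: idiomatic; same asymptotic cost).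

-- ===== PORT A =====
-- the 'replacements' dict of A; iterated in insertion order
def pvReplacements : List (String × String) :=
  [("<", "\uff1c"), (">", "\uff1e"), ("\"", "\uff02"), ("'", "\uff07"), ("/", "\uff0f"), ("\\", "\uff3c")]

def apply_unicode_normalization (payload : String) : String :=
  pvReplacements.foldl (fun result p => PySem.Str.replace result p.1 p.2) payload

-- ===== PORT B =====
-- the 'mapping' dict of B (keys/values are single chars)
def pvMapping : PySem.Dict Char Char :=
  (((((PySem.Dict.empty.insert '<' '\uff1c').insert '>' '\uff1e').insert '"' '\uff02').insert '\'' '\uff07').insert '/' '\uff0f').insert '\\' '\uff3c'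

def apply_unicode_normalization_alt (payload : String) : String :=
  String.ofList (payload.toList.map (fun c => pvMapping.getD c c))

-- ===== PRECONDITION & SPEC =====
def Spec_apply_unicode_normalization (payload : String) (out : String) : Prop := out = apply_unicode_normalization_alt payload
instance (payload : String) (out : String) : Decidable (Spec_apply_unicode_normalization payload out) := by unfold Spec_apply_unicode_normalization; infer_instance

-- ===== CLAIM (what is proved, stated in full; the proofs are below) =====
def Claim_equal_apply_unicode_normalization : Prop := ∀ (payload : String), Dom_apply_unicode_normalization payload → Spec_apply_unicode_normalization payload (apply_unicode_normalization payload)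

-- ===== LEMMAS AND PROOFS =====

-- replace.go with a single-char pattern walks the list one char at a time, so it is a map
lemma go_single (c r : Char) : ∀ (fuel : Nat) (l acc : List Char), l.length ≤ fuel →
    PySem.Chars.replace.go [c] [r] fuel l acc = acc.reverse ++ l.map (fun x => if x = c then r else x) := by
  intro fuel
  induction fuel with
  | zero => intro l acc h; have : l = [] := List.eq_nil_of_length_eq_zero (Nat.le_zero.mp h); subst this; simp [PySem.Chars.replace.go]
  | succ n ih =>
    intro l acc h
    cases l with
    | nil => simp [PySem.Chars.replace.go]
    | cons c' t =>
      rw [PySem.Chars.replace.go]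
      by_cases hc : c = c'
      · subst hc
        have hp : [c].isPrefixOf (c :: t) = true := by simp [List.isPrefixOf]
        simp only [hp, if_true, List.length_singleton, List.drop_succ_cons, List.drop_zero]
        rw [ih t _ (by simpa using h)]
        simp
      · have hp : [c].isPrefixOf (c' :: t) = false := by
          simp [List.isPrefixOf]
          exact fun h' => hc h'
        simp only [hp, Bool.false_eq_true, if_false]
        rw [ih t _ (by simpa using h)]
        simp [Ne.symm hc]

lemma replace_single (s : List Char) (c r : Char) :
    PySem.Chars.replace s [c] [r] = s.map (fun x => if x = c then r else x) := by
  simp [PySem.Chars.replace, go_single c r s.length s [] (le_refl _)]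

-- the composition of the six single-char substitutions is the per-char dict lookup
lemma pointwise (x : Char) :
    (fun a => if a = '\\' then '\uff3c' else a)
    ((fun a => if a = '/' then '\uff0f' else a)
    ((fun a => if a = '\'' then '\uff07' else a)
    ((fun a => if a = '"' then '\uff02' else a)
    ((fun a => if a = '>' then '\uff1e' else a)
    ((fun a => if a = '<' then '\uff1c' else a) x))))) = pvMapping.getD x x := by
  by_cases h1 : x = '<'
  · subst h1; decide
  by_cases h2 : x = '>'
  · subst h2; decide
  by_cases h3 : x = '"'
  · subst h3; decide
  by_cases h4 : x = '\''
  · subst h4; decide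
  by_cases h5 : x = '/'
  · subst h5; decide
  by_cases h6 : x = '\\'
  · subst h6; decide
  simp only [pvMapping, PySem.Dict.getD_insert, PySem.Dict.getD_empty,
    if_neg h1, if_neg h2, if_neg h3, if_neg h4, if_neg h5, if_neg h6]

theorem ports_agree (payload : String) :
    apply_unicode_normalization payload = apply_unicode_normalization_alt payload := by
  unfold apply_unicode_normalization apply_unicode_normalization_alt pvReplacements
  simp only [List.foldl, PySem.Str.replace, String.toList_ofList]
  congr 1
  simp only [show ("<".toList)=['<'] from rfl, show (">".toList)=['>'] from rfl,
    show ("\"".toList)=['"'] from rfl, show ("'".toList)=['\''] from rfl,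
    show ("/".toList)=['/'] from rfl, show ("\\".toList)=['\\'] from rfl,
    show ("\uff1c".toList)=['\uff1c'] from rfl, show ("\uff1e".toList)=['\uff1e'] from rfl,
    show ("\uff02".toList)=['\uff02'] from rfl, show ("\uff07".toList)=['\uff07'] from rfl,
    show ("\uff0f".toList)=['\uff0f'] from rfl, show ("\uff3c".toList)=['\uff3c'] from rfl]
  simp only [replace_single, List.map_map]
  exact List.map_congr_left (fun x _ => by simpa [Function.comp] using pointwise x)

-- ===== VERDICT (by name: the statement is the Claim_ definition above) =====
theorem apply_unicode_normalization_spec : Claim_equal_apply_unicode_normalization := by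
  intro payload _
  unfold Spec_apply_unicode_normalization
  exact ports_agree payload
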